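-- pv_equiv track=rewrite | github.com/Wisien999/WDI2020 | zestaw3/zad18.py | split_by_even
-- ===== SOURCE A (Python) =====
-- def split_by_even(arr):
--     answer = []
--     curr_list = []
--
--     for el in arr:
--         if el % 2 == 1:
--             curr_list.append(el)
--         else:
--             if len(curr_list) > 0:
--                 answer.append(curr_list)
--
--             curr_list = []
--
--     if len(curr_list) > 0:
--         answer.append(curr_list)
--
--     return answer
-- ===== SOURCE B (Python) =====
-- def split_by_even(arr):
--     # Two-pointer span scan: find each maximal run of consecutive odd
--     # numbers directly and slice it out, instead of maintaining a
--     # growing accumulator list with reset logic.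
--     result = []
--     i = 0
--     n = len(arr)
--     while i < n:
--         if arr[i] % 2 == 1:
--             j = i + 1
--             while j < n and arr[j] % 2 == 1:
--                 j += 1
--             result.append(arr[i:j])
--             i = j
--         else:
--             i += 1
--     return result
-- ===== Notes on version B (the rewrite author's own statement) =====
-- stated objective: alternative
-- what changed: Replaces A's single pass with a mutable current-run accumulator and boundary/reset logic by a two-pointer span scan that locates each maximal odd run and slices it out directly.
import Mathlib
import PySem

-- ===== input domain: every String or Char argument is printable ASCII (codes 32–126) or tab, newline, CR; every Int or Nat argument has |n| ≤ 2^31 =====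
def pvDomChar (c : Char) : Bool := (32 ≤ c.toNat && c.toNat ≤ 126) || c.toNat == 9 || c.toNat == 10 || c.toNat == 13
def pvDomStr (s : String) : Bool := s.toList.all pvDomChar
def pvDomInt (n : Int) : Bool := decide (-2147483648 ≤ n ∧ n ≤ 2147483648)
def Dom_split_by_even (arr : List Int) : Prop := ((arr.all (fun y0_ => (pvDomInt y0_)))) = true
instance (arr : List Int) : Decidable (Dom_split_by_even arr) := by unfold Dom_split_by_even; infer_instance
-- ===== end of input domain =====

-- B replaces A's accumulator-with-reset pass by a span scan that extracts each maximal odd run directly (objective: alternative).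

-- ===== PORT A =====
-- A's loop body and the final flush of curr_list, as named helpers.
def pvStep (s : List (List Int) × List Int) (el : Int) : List (List Int) × List Int :=
  if PySem.Int.mod el 2 = 1 then (s.1, s.2 ++ [el])
  else if s.2.length > 0 then (s.1 ++ [s.2], ([] : List Int))
  else (s.1, ([] : List Int))

def pvFin (s : List (List Int) × List Int) : List (List Int) :=
  if s.2.length > 0 then s.1 ++ [s.2] else s.1

def split_by_even (arr : List Int) : List (List Int) :=
  pvFin (arr.foldl pvStep (([] : List (List Int)), ([] : List Int)))

-- ===== PORT B =====
def pvOdd (y : Int) : Bool := PySem.Int.mod y 2 = 1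

-- Source B's inner `while j < n and arr[j] % 2 == 1` scan is takeWhile/dropWhile;
-- `arr[i:j]` is the run taken, and recursion resumes at position j (or i+1 on an even head).
def split_by_even_alt (arr : List Int) : List (List Int) :=
  match arr with
  | [] => []
  | x :: xs =>
    if pvOdd x then
      ((x :: xs).takeWhile pvOdd) :: split_by_even_alt ((x :: xs).dropWhile pvOdd)
    else
      split_by_even_alt xs
termination_by arr.length
decreasing_by
  · simp [List.dropWhile, *]
    exact List.length_dropWhile_le pvOdd xs
  · simp

-- ===== PRECONDITION & SPEC =====
def Spec_split_by_even (arr : List Int) (out : List (List Int)) : Prop := out = split_by_even_alt arr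
instance (arr : List Int) (out : List (List Int)) : Decidable (Spec_split_by_even arr out) := by unfold Spec_split_by_even; infer_instance

-- ===== CLAIM (what is proved, stated in full; the proofs are below) =====
def Claim_equal_split_by_even : Prop := ∀ (arr : List Int), Dom_split_by_even arr → Spec_split_by_even arr (split_by_even arr)

-- ===== LEMMAS AND PROOFS =====

theorem alt_nil : split_by_even_alt [] = [] := by
  unfold split_by_even_alt
  rfl

theorem alt_cons (x : Int) (xs : List Int) :
    split_by_even_alt (x :: xs) =
      if pvOdd x then
        ((x :: xs).takeWhile pvOdd) :: split_by_even_alt ((x :: xs).dropWhile pvOdd)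
      else split_by_even_alt xs := by
  rw [split_by_even_alt]

-- A's remaining computation as a function of the pending curr_list and the rest of the input.
def pvH (cur : List Int) : List Int → List (List Int)
  | [] => if cur.length > 0 then [cur] else []
  | x :: xs =>
    if PySem.Int.mod x 2 = 1 then pvH (cur ++ [x]) xs
    else if cur.length > 0 then cur :: pvH [] xs else pvH [] xs

theorem pvH_foldl (arr : List Int) : ∀ (ans : List (List Int)) (cur : List Int),
    pvFin (arr.foldl pvStep (ans, cur)) = ans ++ pvH cur arr := by
  induction arr with
  | nil =>
    intro ans cur
    rw [List.foldl_nil]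
    unfold pvFin pvH
    split_ifs <;> simp_all
  | cons x xs ih =>
    intro ans cur
    rw [List.foldl_cons]
    by_cases hx : PySem.Int.mod x 2 = 1
    · have hs : pvStep (ans, cur) x = (ans, cur ++ [x]) := by
        unfold pvStep; rw [if_pos hx]
      rw [hs, ih, pvH, if_pos hx]
    · by_cases hc : cur.length > 0
      · have hs : pvStep (ans, cur) x = (ans ++ [cur], []) := by
          unfold pvStep; rw [if_neg hx, if_pos hc]
        rw [hs, ih, pvH, if_neg hx, if_pos hc, List.append_assoc, List.singleton_append]
      · have hs : pvStep (ans, cur) x = (ans, []) := by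
          unfold pvStep; rw [if_neg hx, if_neg hc]
        rw [hs, ih, pvH, if_neg hx, if_neg hc]

theorem pvH_alt (arr : List Int) : ∀ (cur : List Int),
    pvH cur arr =
      if cur = [] then split_by_even_alt arr
      else (cur ++ arr.takeWhile pvOdd) :: split_by_even_alt (arr.dropWhile pvOdd) := by
  induction arr with
  | nil =>
    intro cur
    rw [pvH, alt_nil]
    cases cur <;> simp [alt_nil]
  | cons x xs ih =>
    intro cur
    by_cases hx : PySem.Int.mod x 2 = 1
    · have hodd : pvOdd x = true := by unfold pvOdd; exact decide_eq_true hx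
      rw [pvH, if_pos hx, ih (cur ++ [x]), alt_cons, if_pos hodd,
          List.takeWhile_cons_of_pos hodd, List.dropWhile_cons_of_pos hodd]
      by_cases hc : cur = []
      · subst hc; simp
      · simp [hc]
    · have hodd : pvOdd x = false := by unfold pvOdd; exact decide_eq_false hx
      have h0 := ih []
      rw [if_pos rfl] at h0
      have hacons : split_by_even_alt (x :: xs) = split_by_even_alt xs := by
        rw [alt_cons, if_neg (by simp [hodd])]
      rw [pvH, if_neg hx,
          List.takeWhile_cons_of_neg (by simp [hodd]),
          List.dropWhile_cons_of_neg (by simp [hodd]), hacons]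
      by_cases hc : cur = []
      · subst hc; simp [h0]
      · rw [if_pos (List.length_pos_iff.mpr hc), if_neg hc, h0]
        simp

-- ===== VERDICT (by name: the statement is the Claim_ definition above) =====
theorem split_by_even_spec : Claim_equal_split_by_even := by
  intro arr _
  unfold Spec_split_by_even split_by_even
  rw [pvH_foldl arr [] [], pvH_alt arr []]
  simp
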